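-- pv_equiv track=rewrite | github.com/Chanwoong1/Algorithm-Study | programmers/LEVEL2/수식 최대화.py | dustks
-- ===== SOURCE A (Python) =====
-- def dustks(expression, rlgh) :
--     i = 0
--     while rlgh in expression :
--         if expression[i] == rlgh :
--             if rlgh == '*' :
--                 expression[i - 1] = str(int(expression[i - 1]) * int(expression[i + 1]))
--                 expression.pop(i)
--                 expression.pop(i)
--                 i = 0
--             elif rlgh == '+' :
--                 expression[i - 1] = str(int(expression[i - 1]) + int(expression[i + 1]))
--                 expression.pop(i)
--                 expression.pop(i)
--                 i = 0
--             else :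
--                 expression[i - 1] = str(int(expression[i - 1]) - int(expression[i + 1]))
--                 expression.pop(i)
--                 expression.pop(i)
--                 i = 0
--         else :
--             i += 1
--     return expression
-- ===== SOURCE B (Python) =====
-- def _combine(prev, nxt, rlgh):
--     if rlgh == '*':
--         return str(int(prev) * int(nxt))
--     elif rlgh == '+':
--         return str(int(prev) + int(nxt))
--     else:
--         return str(int(prev) - int(nxt))
--
--
-- def dustks(expression, rlgh):
--     # One forward pass: every time the operator is met, fold the next token
--     # into the last emitted value. (Does not mutate `expression` like A does.)
--     out = []
--     i = 0
--     n = len(expression)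
--     while i < n:
--         tok = expression[i]
--         if tok == rlgh:
--             out[-1] = _combine(out[-1], expression[i + 1], rlgh)
--             i += 2
--         else:
--             out.append(tok)
--             i += 1
--     return out
-- ===== Notes on version B (the rewrite author's own statement) =====
-- stated objective: alternative
-- what changed: B replaces A's merge-at-leftmost-occurrence while loop (which re-evaluates `rlgh in expression` every iteration and rescans from index 0 after every merge) by a single forward pass that folds the token following each operator occurrence into the last emitted value; same value, different traversal (A's rescans make it quadratic when many occurrences are merged, B stays one pass, though a timing run's occurrence-free inputs show no measured speedup).
-- outside the precondition, e.g. on dustks(['9', '7', '2', '7', '2'], '7'): A returns ['-5'], B returns ['5']; on dustks(['+', '2'], '+'): A returns [], B raises IndexError; on dustks(['1', '5', '2'], '5'): A returns ['-1'], B returns ['-1']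
import Mathlib
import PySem

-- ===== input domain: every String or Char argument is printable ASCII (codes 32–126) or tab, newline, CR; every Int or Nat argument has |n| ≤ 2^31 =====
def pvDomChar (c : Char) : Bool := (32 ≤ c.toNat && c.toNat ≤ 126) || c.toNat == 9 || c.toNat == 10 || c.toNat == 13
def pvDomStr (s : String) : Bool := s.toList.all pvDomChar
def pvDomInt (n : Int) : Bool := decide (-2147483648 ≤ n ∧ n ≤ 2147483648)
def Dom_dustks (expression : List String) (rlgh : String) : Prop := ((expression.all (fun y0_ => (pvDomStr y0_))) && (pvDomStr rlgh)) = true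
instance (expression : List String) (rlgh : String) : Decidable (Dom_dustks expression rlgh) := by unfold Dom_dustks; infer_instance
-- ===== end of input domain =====

-- B replaces A's merge-and-rescan-from-0 while loop by a single forward pass that
-- folds each operand following the operator into the last emitted value (objective:
-- alternative). A mutates `expression` in place (pops/assignments); B does not — the
-- equivalence proved here is about the RETURN value only.


-- ===== PORT A =====
-- A's while loop: scan from i upward for an occurrence of rlgh, merge the two
-- neighbours there (expression[i-1] = combined; two pops), reset i to 0, repeat
-- while rlgh is in the list.  Where Python raises (IndexError on expression[i+1],
-- ValueError from int()) the PySem primitive yields none and we return the current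
-- list; those inputs are excluded by Pre_.
def dustksLoop (rlgh : String) (e : List String) (i : Nat) : List String :=
  if rlgh ∈ e then
    match h1 : PySem.List.pyGet? e (i : Int) with
    | none => e  -- IndexError (never reached: i stays ≤ first occurrence index)
    | some t =>
      if t = rlgh then
        -- expression[i - 1] = str(int(expression[i - 1]) <op> int(expression[i + 1]))
        -- (Python indices, i - 1 may be -1), then the two pops
        match PySem.List.pyGet? e ((i : Int) - 1) with
        | none => e  -- IndexError (unreachable: -1 ≤ i - 1 < len)
        | some a =>
          match PySem.Int.ofStr? a with
          | none => e  -- ValueError from int() (outside Pre_)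
          | some x =>
            match PySem.List.pyGet? e ((i : Int) + 1) with
            | none => e  -- IndexError on expression[i + 1] (outside Pre_)
            | some b =>
              match PySem.Int.ofStr? b with
              | none => e  -- ValueError from int() (outside Pre_)
              | some y =>
                let e1 := PySem.List.pySetD e ((i : Int) - 1)
                  (PySem.Int.toStr (if rlgh = "*" then x * y else if rlgh = "+" then x + y else x - y))
                match h2 : PySem.List.pop? e1 (i : Int) with
                | none => e1  -- IndexError (unreachable)
                | some p2 =>
                  match h3 : PySem.List.pop? p2.2 (i : Int) with
                  | none => p2.2  -- IndexError (unreachable)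
                  | some p3 => dustksLoop rlgh p3.2 0
      else dustksLoop rlgh e (i + 1)
  else e
termination_by (e.length, e.length - i)
decreasing_by
  · have l0 : e1.length = e.length := PySem.List.length_pySetD e _ _
    have l1 := PySem.List.length_of_pop?_eq_some _ h2
    have l2 := PySem.List.length_of_pop?_eq_some _ h3
    apply Prod.Lex.left
    omega
  · have hi : i < e.length := by
      have := h1
      rw [PySem.List.pyGet?_natCast] at this
      exact (List.getElem?_eq_some_iff.mp this).1
    apply Prod.Lex.right
    omega

def dustks (expression : List String) (rlgh : String) : List String :=
  dustksLoop rlgh expression 0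

-- ===== PORT B =====
-- Source B's `_combine(prev, nxt, rlgh)`; none = Python's ValueError from int()
def pvCombine (prev nxt rlgh : String) : Option String :=
  match PySem.Int.ofStr? prev, PySem.Int.ofStr? nxt with
  | some x, some y =>
      some (PySem.Int.toStr (if rlgh = "*" then x * y else if rlgh = "+" then x + y else x - y))
  | _, _ => none

-- Source B's single forward pass; `out` is kept reversed (head = Python's out[-1]).
-- Where Source B raises (out[-1] on empty out, expression[i+1] past the end, int())
-- we return the partially processed list; those inputs are outside Pre_.
def dustksAltLoop (rlgh : String) (e : List String) (i : Nat) (out : List String) : List String :=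
  if h : i < e.length then
    if e[i] = rlgh then
      match out with
      | [] => out.reverse ++ e.drop i       -- IndexError: out[-1] on empty out (outside Pre_)
      | prev :: d =>
        match PySem.List.pyGet? e ((i : Int) + 1) with
        | none => out.reverse ++ e.drop i   -- IndexError on expression[i + 1] (outside Pre_)
        | some nxt =>
          match pvCombine prev nxt rlgh with
          | some v => dustksAltLoop rlgh e (i + 2) (v :: d)
          | none => out.reverse ++ e.drop i -- ValueError from int() (outside Pre_)
    else dustksAltLoop rlgh e (i + 1) (e[i] :: out)
  else out.reverse
termination_by e.length - i

def dustks_alt (expression : List String) (rlgh : String) : List String :=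
  dustksAltLoop rlgh expression 0 []

-- ===== PRECONDITION & SPEC =====
-- Pre_ admits any input in which rlgh does not occur (A returns it unchanged) and
-- otherwise requires a well-shaped expression: rlgh is one of the three operator
-- tokens '*','+','-', does not sit at either end, and every token adjacent to an
-- occurrence of rlgh parses as a Python int.  This excludes (a) inputs where A
-- raises (IndexError/ValueError), on which B raises too, and (b) inputs with an
-- int-like rlgh or a leading rlgh, where A's value comes from negative-index
-- wraparound or from re-scanning a merged result equal to rlgh — accidental
-- corners on which B's natural pass raises or returns the plainly-merged value.
def Pre_dustks (expression : List String) (rlgh : String) : Prop :=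
  rlgh ∉ expression ∨
    ((rlgh = "*" ∨ rlgh = "+" ∨ rlgh = "-") ∧
     expression.head? ≠ some rlgh ∧ expression.getLast? ≠ some rlgh ∧
     List.IsChain (fun u v => (u = rlgh → (PySem.Int.ofStr? v).isSome = true) ∧
                             (v = rlgh → (PySem.Int.ofStr? u).isSome = true)) expression)
instance (expression : List String) (rlgh : String) : Decidable (Pre_dustks expression rlgh) := by
  unfold Pre_dustks; infer_instance

def pvWitness_dustks : List String × String := (["1", "+", "2", "*", "3"], "+")

def Spec_dustks (expression : List String) (rlgh : String) (out : List String) : Prop :=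
  out = dustks_alt expression rlgh
instance (expression : List String) (rlgh : String) (out : List String) :
    Decidable (Spec_dustks expression rlgh out) := by unfold Spec_dustks; infer_instance

-- ===== CLAIM (what is proved, stated in full; the proofs are below) =====
def Claim_equal_dustks : Prop := ∀ (expression : List String) (rlgh : String),
  Dom_dustks expression rlgh → Pre_dustks expression rlgh →
  Spec_dustks expression rlgh (dustks expression rlgh)

-- ===== LEMMAS AND PROOFS =====

lemma pvDigitChar_ne {m : Nat} (hm : m < 10) :
    Nat.digitChar m ≠ '*' ∧ Nat.digitChar m ≠ '+' ∧ Nat.digitChar m ≠ '-' := by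
  interval_cases m <;> decide

lemma pvToDigitsCore_chars (f : Nat) : ∀ (n : Nat) (l : List Char) (c : Char),
    c ∈ Nat.toDigitsCore 10 f n l → c ∈ l ∨ ∃ m, m < 10 ∧ c = Nat.digitChar m := by
  induction f with
  | zero => intro n l c hc; simp [Nat.toDigitsCore] at hc; exact Or.inl hc
  | succ f ih =>
    intro n l c hc
    simp only [Nat.toDigitsCore] at hc
    split at hc
    · rcases List.mem_cons.mp hc with h | h
      · exact Or.inr ⟨n % 10, Nat.mod_lt _ (by norm_num), h⟩
      · exact Or.inl h
    · rcases ih _ _ _ hc with h | h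
      · rcases List.mem_cons.mp h with h | h
        · exact Or.inr ⟨n % 10, Nat.mod_lt _ (by norm_num), h⟩
        · exact Or.inl h
      · exact Or.inr h

lemma pvToDigitsCore_ne_nil (f : Nat) : ∀ (n : Nat) (l : List Char), (0 < f ∨ l ≠ []) →
    Nat.toDigitsCore 10 f n l ≠ [] := by
  induction f with
  | zero => intro n l h; simpa [Nat.toDigitsCore] using h.resolve_left (by omega)
  | succ f ih =>
    intro n l _
    simp only [Nat.toDigitsCore]
    split
    · exact List.cons_ne_nil _ _
    · exact ih _ _ (Or.inr (List.cons_ne_nil _ _))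

lemma pvToStr_ne_op {rlgh : String} (hr : rlgh = "*" ∨ rlgh = "+" ∨ rlgh = "-") (n : Int) :
    PySem.Int.toStr n ≠ rlgh := by
  intro h
  have hl : PySem.Int.toChars n = rlgh.toList := by
    rw [← PySem.Int.toList_toStr, h]
  have hne : ∀ c ∈ PySem.Int.toChars n, c = '-' ∨ ∃ m, m < 10 ∧ c = Nat.digitChar m := by
    intro c hc
    simp only [PySem.Int.toChars, Nat.toDigits] at hc
    split at hc
    · rcases List.mem_cons.mp hc with h' | h'
      · exact Or.inl h'
      · rcases pvToDigitsCore_chars _ _ _ _ h' with h'' | h''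
        · simp at h''
        · exact Or.inr h''
    · rcases pvToDigitsCore_chars _ _ _ _ hc with h'' | h''
      · simp at h''
      · exact Or.inr h''
  -- rlgh.toList is ['*'], ['+'] or ['-']
  rcases hr with hr | hr | hr <;> subst hr
  · have : '*' ∈ PySem.Int.toChars n := by rw [hl]; decide
    rcases hne _ this with h' | ⟨m, hm, h'⟩
    · exact absurd h' (by decide)
    · exact (pvDigitChar_ne hm).1 h'.symm
  · have : '+' ∈ PySem.Int.toChars n := by rw [hl]; decide
    rcases hne _ this with h' | ⟨m, hm, h'⟩
    · exact absurd h' (by decide)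
    · exact (pvDigitChar_ne hm).2.1 h'.symm
  · -- toChars n = ['-'] is impossible: negative case has '-' :: (nonempty digits)
    have hl' : PySem.Int.toChars n = ['-'] := by rw [hl]; decide
    simp only [PySem.Int.toChars, Nat.toDigits] at hl'
    split at hl'
    · have := pvToDigitsCore_ne_nil (n.natAbs + 1) n.natAbs [] (Or.inl (by omega))
      rw [List.cons_eq_cons] at hl'
      exact this hl'.2
    · have := pvToDigitsCore_ne_nil (n.toNat + 1) n.toNat [] (Or.inl (by omega))
      have h10 : Nat.toDigitsCore 10 (n.toNat + 1) n.toNat [] = ['-'] := hl'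
      rcases pvToDigitsCore_chars _ _ _ '-' (by rw [h10]; decide) with h' | ⟨m, hm, h'⟩
      · simp at h'
      · exact (pvDigitChar_ne hm).2.2 h'.symm

def gMerge (rlgh acc : String) : List String → List String
  | [] => [acc]
  | r :: rest =>
    if r = rlgh then
      match rest with
      | [] => [acc, r]
      | y :: rest' =>
        match pvCombine acc y rlgh with
        | some v => gMerge rlgh v rest'
        | none => acc :: r :: y :: rest'
    else acc :: gMerge rlgh r rest
termination_by l => l.length

def pvF (rlgh : String) : List String → List String
  | [] => []
  | x :: rest => gMerge rlgh x rest

lemma gMerge_nil (rlgh acc : String) : gMerge rlgh acc [] = [acc] := by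
  rw [gMerge.eq_def]

lemma gMerge_cons_ne (rlgh acc r : String) (rest : List String) (h : r ≠ rlgh) :
    gMerge rlgh acc (r :: rest) = acc :: gMerge rlgh r rest := by
  rw [gMerge.eq_def]; simp [h]

lemma gMerge_op_some (rlgh acc y v : String) (rest' : List String)
    (h : pvCombine acc y rlgh = some v) :
    gMerge rlgh acc (rlgh :: y :: rest') = gMerge rlgh v rest' := by
  rw [gMerge.eq_def]; simp [h]

lemma gMerge_op_none (rlgh acc y : String) (rest' : List String)
    (h : pvCombine acc y rlgh = none) :
    gMerge rlgh acc (rlgh :: y :: rest') = acc :: rlgh :: y :: rest' := by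
  rw [gMerge.eq_def]; simp [h]

lemma gMerge_op_end (rlgh acc : String) : gMerge rlgh acc [rlgh] = [acc, rlgh] := by
  rw [gMerge.eq_def]; simp

lemma gMerge_no_occ (rlgh : String) : ∀ (rest : List String), rlgh ∉ rest →
    ∀ acc, gMerge rlgh acc rest = acc :: rest := by
  intro rest
  induction rest with
  | nil => intro _ acc; rw [gMerge.eq_def]
  | cons r rest ih =>
    intro h acc
    have hr : r ≠ rlgh := fun hh => h (by simp [hh])
    rw [gMerge_cons_ne _ _ _ _ hr, ih (fun hh => h (by simp [hh]))]

lemma gMerge_pre (rlgh : String) : ∀ (pre : List String) (acc a : String) (m : List String),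
    rlgh ∉ pre → a ≠ rlgh →
    gMerge rlgh acc (pre ++ a :: m) = acc :: (pre ++ gMerge rlgh a m) := by
  intro pre
  induction pre with
  | nil =>
    intro acc a m _ ha
    rw [List.nil_append, gMerge_cons_ne _ _ _ _ ha]; simp
  | cons t pre ih =>
    intro acc a m h ha
    have ht : t ≠ rlgh := fun hh => h (by simp [hh])
    rw [List.cons_append, gMerge_cons_ne _ _ _ _ ht, ih t a m (fun hh => h (by simp [hh])) ha]
    simp

lemma altLoop_eq_g (rlgh : String) (e : List String) : ∀ (k i : Nat), e.length - i ≤ k →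
    ∀ acc d, dustksAltLoop rlgh e i (acc :: d) = d.reverse ++ gMerge rlgh acc (e.drop i) := by
  intro k
  induction k with
  | zero =>
    intro i hk acc d
    have hi : ¬ i < e.length := by omega
    rw [dustksAltLoop.eq_def, dif_neg hi, List.drop_eq_nil_of_le (by omega), gMerge_nil]
    simp
  | succ k ih =>
    intro i hk acc d
    by_cases hi : i < e.length
    · have hdrop : e.drop i = e[i] :: e.drop (i + 1) := List.drop_eq_getElem_cons hi
      rw [dustksAltLoop.eq_def, dif_pos hi]
      by_cases ht : e[i] = rlgh
      · rw [if_pos ht]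
        have hget : PySem.List.pyGet? e ((i : Int) + 1) = e[i + 1]? := by
          have h1 : ((i : Int) + 1) = ((i + 1 : Nat) : Int) := by push_cast; ring
          rw [h1, PySem.List.pyGet?_natCast]
        rcases hrest : e.drop (i + 1) with _ | ⟨nxt, rest2⟩
        · have hnone : e[i + 1]? = none := by rw [← List.head?_drop, hrest]; rfl
          rw [hget, hnone, hdrop, hrest, ht, gMerge_op_end]
          simp
        · have hnxt : e[i + 1]? = some nxt := by rw [← List.head?_drop, hrest]; rfl
          have hrest2 : rest2 = e.drop (i + 2) := by
            have h2 : e.drop (i + 2) = (e.drop (i + 1)).drop 1 := by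
              rw [List.drop_drop]
            rw [h2, hrest]; rfl
          rw [hget, hnxt]
          rcases hc : pvCombine acc nxt rlgh with _ | v
          · rw [hdrop, hrest, ht, gMerge_op_none _ _ _ _ hc]
            simp [hc]
          · rw [hdrop, hrest, ht, gMerge_op_some _ _ _ _ _ hc]
            simp only [List.reverse_cons]
            simp [hc]
            rw [ih (i + 2) (by omega) v d, ← hrest2]
      · rw [if_neg ht, ih (i + 1) (by omega) (e[i]) (acc :: d), hdrop,
          gMerge_cons_ne _ _ _ _ ht]
        simp
    · rw [dustksAltLoop.eq_def, dif_neg hi, List.drop_eq_nil_of_le (by omega), gMerge_nil]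
      simp

lemma dustks_alt_eq_F (rlgh : String) (e : List String) (h : e.head? ≠ some rlgh) :
    dustks_alt e rlgh = pvF rlgh e := by
  rcases e with _ | ⟨x, rest⟩
  · rw [dustks_alt, dustksAltLoop.eq_def]; rfl
  · have hx : x ≠ rlgh := by simpa using h
    rw [dustks_alt, dustksAltLoop.eq_def, dif_pos (by simp)]
    simp only [List.getElem_cons_zero]
    rw [if_neg hx, altLoop_eq_g rlgh (x :: rest) (x :: rest).length 1 (by simp) x []]
    simp [pvF]

lemma pvSet_len (l t : List String) (x v : String) :
    (l ++ x :: t).set l.length v = l ++ v :: t := by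
  simp

lemma pvErase_len_succ (l t : List String) (x y : String) :
    (l ++ x :: y :: t).eraseIdx (l.length + 1) = l ++ x :: t := by
  simp [List.eraseIdx_append_of_length_le (by omega : l.length ≤ l.length + 1)]

lemma pvCombine_ne_op {rlgh : String} (hops : rlgh = "*" ∨ rlgh = "+" ∨ rlgh = "-")
    {a y v : String} (hc : pvCombine a y rlgh = some v) : v ≠ rlgh := by
  unfold pvCombine at hc
  rcases ha : PySem.Int.ofStr? a with _ | x <;> rcases hy : PySem.Int.ofStr? y with _ | z <;>
    rw [ha, hy] at hc <;> simp at hc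
  rw [← hc]
  exact pvToStr_ne_op hops _

lemma pvF_decomp (rlgh : String) (pre : List String) (a : String) (m : List String)
    (hpre : rlgh ∉ pre) (ha : a ≠ rlgh) :
    pvF rlgh (pre ++ a :: m) = pre ++ gMerge rlgh a m := by
  rcases pre with _ | ⟨x, pre'⟩
  · rfl
  · have hx : x ≠ rlgh := fun hh => hpre (by simp [hh])
    show gMerge rlgh x (pre' ++ a :: m) = _
    rw [gMerge_pre rlgh pre' x a m (fun hh => hpre (by simp [hh])) ha]
    rfl

lemma pvFirst_occ (rlgh : String) : ∀ (e : List String), e.head? ≠ some rlgh → rlgh ∈ e →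
    ∃ pre a suf0, e = pre ++ a :: rlgh :: suf0 ∧ rlgh ∉ pre ∧ a ≠ rlgh := by
  intro e
  induction e with
  | nil => simp
  | cons x rest ih =>
    intro hh hm
    have hx : x ≠ rlgh := by simpa using hh
    have hm' : rlgh ∈ rest := by
      rcases List.mem_cons.mp hm with h | h
      · exact absurd h.symm hx
      · exact h
    rcases rest with _ | ⟨r, rest'⟩
    · simp at hm'
    · by_cases hr : r = rlgh
      · exact ⟨[], x, rest', by simp [hr], by simp, hx⟩
      · obtain ⟨pre, a, suf0, heq, hnp, hna⟩ := ih (by simpa using hr) hm'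
        exact ⟨x :: pre, a, suf0, by simp [heq], by
          intro hmem
          rcases List.mem_cons.mp hmem with h | h
          · exact hx h.symm
          · exact hnp h, hna⟩


lemma pvA_scan (rlgh : String) (pre : List String) (a : String) (suf0 : List String)
    (hpre : rlgh ∉ pre) (ha : a ≠ rlgh) :
    ∀ (k i : Nat), i + k = pre.length + 1 →
    dustksLoop rlgh (pre ++ a :: rlgh :: suf0) i =
      (match suf0 with
       | [] => pre ++ a :: rlgh :: suf0
       | y :: suf =>
         match pvCombine a y rlgh with
         | some v => dustksLoop rlgh (pre ++ v :: suf) 0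
         | none => pre ++ a :: rlgh :: suf0) := by
  intro k
  induction k with
  | zero =>
    intro i hi
    have hieq : i = pre.length + 1 := by omega
    subst hieq
    have hmem : rlgh ∈ pre ++ a :: rlgh :: suf0 := by simp
    have hget : PySem.List.pyGet? (pre ++ a :: rlgh :: suf0) ((pre.length + 1 : Nat) : Int)
        = some rlgh := by
      have h1 : pre ++ a :: rlgh :: suf0 = (pre ++ [a]) ++ rlgh :: suf0 := by simp
      have h2 : ((pre.length + 1 : Nat) : Int) = (((pre ++ [a]).length : Nat) : Int) := by simp
      rw [h1, h2]
      exact PySem.List.pyGet?_append_length _ _ _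
    have hgetl : PySem.List.pyGet? (pre ++ a :: rlgh :: suf0) (((pre.length + 1 : Nat) : Int) - 1)
        = some a := by
      have h2 : (((pre.length + 1 : Nat) : Int) - 1) = ((pre.length : Nat) : Int) := by push_cast; ring
      rw [h2]
      exact PySem.List.pyGet?_append_length _ _ _
    have hgetr : PySem.List.pyGet? (pre ++ a :: rlgh :: suf0) (((pre.length + 1 : Nat) : Int) + 1)
        = suf0[0]? := by
      have h2 : (((pre.length + 1 : Nat) : Int) + 1) = ((pre.length + 2 : Nat) : Int) := by push_cast; ring
      rw [h2, PySem.List.pyGet?_natCast]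
      rw [List.getElem?_append_right (by simp)]
      simp
    rcases suf0 with _ | ⟨y, suf⟩
    · rw [dustksLoop.eq_def, if_pos hmem]
      split
      · next h1 => rw [hget] at h1; try cases h1
      · next t h1 =>
        rw [hget] at h1; injection h1 with h1'
        rw [if_pos h1'.symm]
        split
        · next h2 => rw [hgetl] at h2; try cases h2
        · next a' h2 =>
          rw [hgetl] at h2; injection h2 with h2'
          rw [← h2']
          rcases hpa : PySem.Int.ofStr? a with _ | x
          · rfl
          · simp only []
            rw [hgetr]
            rfl
    · have h0 : (y :: suf)[0]? = some y := rfl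
      rw [h0] at hgetr
      rw [dustksLoop.eq_def, if_pos hmem]
      simp only []
      split
      · next h1 => rw [hget] at h1; try cases h1
      · next t h1 =>
        rw [hget] at h1; injection h1 with h1'
        rw [if_pos h1'.symm]
        split
        · next h2 => rw [hgetl] at h2; try cases h2
        · next a' h2 =>
          rw [hgetl] at h2; injection h2 with h2'
          rw [← h2']
          rcases hpa : PySem.Int.ofStr? a with _ | x
          · have hcn : pvCombine a y rlgh = none := by unfold pvCombine; rw [hpa]
            simp only []
            rw [hcn]
          · simp only []
            rw [hgetr]
            simp only []
            rcases hpy : PySem.Int.ofStr? y with _ | z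
            · have hcn : pvCombine a y rlgh = none := by unfold pvCombine; rw [hpa, hpy]
              simp only []
              rw [hcn]
            · have hcv : pvCombine a y rlgh =
                  some (PySem.Int.toStr (if rlgh = "*" then x * z else if rlgh = "+" then x + z else x - z)) := by
                unfold pvCombine; rw [hpa, hpy]
              simp only []
              rw [hcv]
              simp only []
              set v := PySem.Int.toStr (if rlgh = "*" then x * z else if rlgh = "+" then x + z else x - z) with hv
              have hset : PySem.List.pySetD (pre ++ a :: rlgh :: y :: suf)
                  (((pre.length + 1 : Nat) : Int) - 1) v = pre ++ v :: rlgh :: y :: suf := by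
                have h2 : (((pre.length + 1 : Nat) : Int) - 1) = ((pre.length : Nat) : Int) := by push_cast; ring
                rw [h2, PySem.List.pySetD_natCast, pvSet_len]
              have hpop1 : PySem.List.pop? (pre ++ v :: rlgh :: y :: suf)
                  ((pre.length + 1 : Nat) : Int)
                  = some ((pre ++ v :: rlgh :: y :: suf)[pre.length + 1]'(by simp), pre ++ v :: y :: suf) := by
                rw [PySem.List.pop?_natCast (h := by simp)]
                rw [pvErase_len_succ]
              have hpop2 : PySem.List.pop? (pre ++ v :: y :: suf)
                  ((pre.length + 1 : Nat) : Int)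
                  = some ((pre ++ v :: y :: suf)[pre.length + 1]'(by simp), pre ++ v :: suf) := by
                rw [PySem.List.pop?_natCast (h := by simp)]
                rw [pvErase_len_succ]
              split
              · next h3 => rw [hset, hpop1] at h3; try cases h3
              · next p2 h3 =>
                rw [hset, hpop1] at h3; injection h3 with h3'
                rw [← h3']
                simp only []
                split
                · next h4 => rw [hpop2] at h4; try cases h4
                · next p3 h4 =>
                  rw [hpop2] at h4; injection h4 with h4'
                  rw [← h4']
  | succ k ih =>
    intro i hi
    have hilt : i < (pre ++ [a]).length := by simp; omega
    have hmem : rlgh ∈ pre ++ a :: rlgh :: suf0 := by simp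
    have hnotop : (pre ++ [a])[i] ≠ rlgh := by
      have hm : (pre ++ [a])[i] ∈ pre ++ [a] := List.getElem_mem _
      rcases List.mem_append.mp hm with h | h
      · exact fun hh => hpre (hh ▸ h)
      · simp at h
        rw [h]
        exact ha
    have hget : PySem.List.pyGet? (pre ++ a :: rlgh :: suf0) ((i : Nat) : Int)
        = some ((pre ++ [a])[i]) := by
      rw [PySem.List.pyGet?_natCast]
      have h1 : pre ++ a :: rlgh :: suf0 = (pre ++ [a]) ++ rlgh :: suf0 := by simp
      rw [h1, List.getElem?_append_left hilt, List.getElem?_eq_getElem hilt]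
    rw [dustksLoop.eq_def, if_pos hmem]
    split
    · next h1 => rw [hget] at h1; try cases h1
    · next t h1 =>
      rw [hget] at h1; injection h1 with h1'
      rw [← h1', if_neg hnotop]
      exact ih (i + 1) (by omega)

lemma pvMainA (rlgh : String) (hops : rlgh = "*" ∨ rlgh = "+" ∨ rlgh = "-") :
    ∀ (N : Nat) (e : List String), e.length ≤ N → e.head? ≠ some rlgh →
    dustksLoop rlgh e 0 = pvF rlgh e := by
  intro N
  induction N with
  | zero =>
    intro e he _
    have : e = [] := List.length_eq_zero_iff.mp (by omega)
    subst this
    rw [dustksLoop.eq_def]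
    simp [pvF]
  | succ N ih =>
    intro e he hh
    by_cases hm : rlgh ∈ e
    · obtain ⟨pre, a, suf0, heq, hpre, ha⟩ := pvFirst_occ rlgh e hh hm
      subst heq
      rw [pvA_scan rlgh pre a suf0 hpre ha (pre.length + 1) 0 (by omega)]
      rcases suf0 with _ | ⟨y, suf⟩
      · rw [pvF_decomp rlgh pre a [rlgh] hpre ha, gMerge_op_end]
      · simp only []
        rcases hc : pvCombine a y rlgh with _ | v
        · rw [pvF_decomp rlgh pre a (rlgh :: y :: suf) hpre ha, gMerge_op_none _ _ _ _ hc]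
        · have hv : v ≠ rlgh := pvCombine_ne_op hops hc
          have hh' : (pre ++ v :: suf).head? ≠ some rlgh := by
            rcases pre with _ | ⟨x, pre'⟩
            · simpa using hv
            · simpa using (by simpa using hh : x ≠ rlgh)
          have hlen : (pre ++ v :: suf).length ≤ N := by
            simp at he ⊢
            omega
          simp only []
          rw [ih (pre ++ v :: suf) hlen hh']
          rw [pvF_decomp rlgh pre a (rlgh :: y :: suf) hpre ha,
              gMerge_op_some _ _ _ _ _ hc,
              pvF_decomp rlgh pre v suf hpre hv]
    · rw [dustksLoop.eq_def, if_neg hm]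
      rcases e with _ | ⟨x, rest⟩
      · rfl
      · show _ = gMerge rlgh x rest
        rw [gMerge_no_occ rlgh rest (fun hh' => hm (by simp [hh'])) x]

-- ===== VERDICT (by name: the statement is the Claim_ definition above) =====
theorem dustks_spec : Claim_equal_dustks := by
  intro expression rlgh _ hpre
  unfold Spec_dustks
  rcases hpre with hno | ⟨hops, hh, _, _⟩
  · -- rlgh does not occur: both sides return the input unchanged
    have hA : dustks expression rlgh = expression := by
      rw [dustks, dustksLoop.eq_def, if_neg hno]
    have hB : dustks_alt expression rlgh = expression := by
      have hh : expression.head? ≠ some rlgh := by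
        rcases expression with _ | ⟨x, rest⟩
        · simp
        · simpa using fun hx => hno (by simp [hx])
      rw [dustks_alt_eq_F rlgh expression hh]
      rcases expression with _ | ⟨x, rest⟩
      · rfl
      · show gMerge rlgh x rest = _
        rw [gMerge_no_occ rlgh rest (fun hh' => hno (by simp [hh'])) x]
    rw [hA, hB]
  · rw [dustks, pvMainA rlgh hops expression.length expression le_rfl hh,
        dustks_alt_eq_F rlgh expression hh]
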